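-- pv_equiv track=rewrite | github.com/igidae2026-creator/exit | metaos/runtime/adapter_recovery.py | detect_duplicate_events
-- ===== SOURCE A (Python) =====
-- from typing import Any, Dict, Iterable, Sequence, Tuple
--
-- def detect_duplicate_events(events: Sequence[Dict[str, Any]]) -> list[Dict[str, Any]]:
--     seen: set[Tuple[Any, Any, Any]] = set()
--     duplicates = []
--     for event in events:
--         payload = event.get("payload") if isinstance(event.get("payload"), dict) else {}
--         key = (event.get("type"), event.get("ts"), tuple(sorted(payload.items())))
--         if key in seen:
--             duplicates.append(event)
--             continue
--         seen.add(key)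
--     return duplicates
-- ===== SOURCE B (Python) =====
-- def detect_duplicate_events(events):
--     def key_of(event):
--         payload = event.get("payload") if isinstance(event.get("payload"), dict) else {}
--         return (event.get("type"), event.get("ts"), tuple(sorted(payload.items())))
--
--     first = {}
--     for i, event in enumerate(events):
--         first.setdefault(key_of(event), i)
--     return [event for i, event in enumerate(events) if first[key_of(event)] != i]
-- ===== Notes on version B (the rewrite author's own statement) =====
-- stated objective: alternative
-- what changed: Instead of a single scan carrying a running seen-set and appending duplicates as it goes, B first builds a dict mapping each key to the index of its first occurrence, then filters the enumerated events keeping exactly those not at their key's first occurrence.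
import Mathlib
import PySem

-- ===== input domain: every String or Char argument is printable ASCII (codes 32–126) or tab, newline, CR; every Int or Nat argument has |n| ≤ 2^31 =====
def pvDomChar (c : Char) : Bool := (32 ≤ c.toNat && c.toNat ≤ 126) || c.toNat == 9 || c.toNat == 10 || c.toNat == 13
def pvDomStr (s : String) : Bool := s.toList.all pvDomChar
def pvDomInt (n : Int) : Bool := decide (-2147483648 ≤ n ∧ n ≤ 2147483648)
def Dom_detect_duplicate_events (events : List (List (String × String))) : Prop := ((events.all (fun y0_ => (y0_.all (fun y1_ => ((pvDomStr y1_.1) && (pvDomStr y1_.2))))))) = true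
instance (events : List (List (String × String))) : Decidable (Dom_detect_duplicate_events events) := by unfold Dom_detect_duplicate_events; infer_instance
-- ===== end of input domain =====

-- B replaces A's single running-seen-set scan by two passes: a dict of each key's
-- first index, then a filter keeping events not at their key's first occurrence (alternative decomposition, same cost).


-- ===== PORT A =====
-- Under the type convention the events are dicts str → str, so event.get("payload") is an
-- Option String, never a dict: the isinstance guard always yields payload = {} and
-- tuple(sorted(payload.items())) = [] — the key's third component is the constant [].
def detect_duplicate_events (events : List (List (String × String))) : List (List (String × String)) :=
  (events.foldl
    (fun (st : PySem.Set (Option String × Option String × List (String × String)) × List (List (String × String))) event =>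
      let key : Option String × Option String × List (String × String) :=
        ((PySem.Dict.mk event).get? "type", (PySem.Dict.mk event).get? "ts", ([] : List (String × String)))
      if PySem.Set.contains st.1 key then (st.1, st.2 ++ [event])
      else (PySem.Set.add st.1 key, st.2))
    (PySem.Set.empty, [])).2

-- ===== PORT B =====
-- key_of: same payload observation as in port A (third component is the constant []).
def pvKeyOf (event : List (String × String)) : Option String × Option String × List (String × String) :=
  ((PySem.Dict.mk event).get? "type", (PySem.Dict.mk event).get? "ts", ([] : List (String × String)))

-- first[key_of(event)] is always present at the filter; get? ≠ some i ports the != test.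
def detect_duplicate_events_alt (events : List (List (String × String))) : List (List (String × String)) :=
  let first : PySem.Dict (Option String × Option String × List (String × String)) Int :=
    (PySem.List.enumerate events 0).foldl (fun d p => d.setdefault (pvKeyOf p.2) p.1) PySem.Dict.empty
  ((PySem.List.enumerate events 0).filter (fun p => first.get? (pvKeyOf p.2) != some p.1)).map (fun p => p.2)

-- ===== PRECONDITION & SPEC =====
def Spec_detect_duplicate_events (events : List (List (String × String))) (out : List (List (String × String))) : Prop := out = detect_duplicate_events_alt events
instance (events : List (List (String × String))) (out : List (List (String × String))) : Decidable (Spec_detect_duplicate_events events out) := by unfold Spec_detect_duplicate_events; infer_instance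

-- ===== CLAIM (what is proved, stated in full; the proofs are below) =====
def Claim_equal_detect_duplicate_events : Prop := ∀ (events : List (List (String × String))), Dom_detect_duplicate_events events → Spec_detect_duplicate_events events (detect_duplicate_events events)

-- ===== LEMMAS AND PROOFS =====

-- the first-occurrence dict of port B
def pvFirst (l : List (List (String × String))) : PySem.Dict (Option String × Option String × List (String × String)) Int :=
  (PySem.List.enumerate l 0).foldl (fun d p => d.setdefault (pvKeyOf p.2) p.1) PySem.Dict.empty

theorem pvFirst_append (l : List (List (String × String))) (e : List (String × String)) :
    pvFirst (l ++ [e]) = (pvFirst l).setdefault (pvKeyOf e) (l.length : Int) := by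
  unfold pvFirst
  rw [PySem.List.enumerate_append, List.foldl_append]
  simp [PySem.List.enumerate]

theorem pvFirst_contains (l : List (List (String × String))) (q : Option String × Option String × List (String × String)) :
    (pvFirst l).contains q = true ↔ q ∈ l.map pvKeyOf := by
  induction l using List.reverseRecOn with
  | nil => simp [pvFirst, PySem.List.enumerate]
  | append_singleton l e ih =>
    rw [pvFirst_append, PySem.Dict.contains_setdefault]
    simp [ih, beq_iff_eq, or_comm]

theorem pvFirst_bound (l : List (List (String × String))) (q : Option String × Option String × List (String × String)) (j : Int)
    (h : (pvFirst l).get? q = some j) : j < (l.length : Int) := by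
  induction l using List.reverseRecOn generalizing j with
  | nil => simp [pvFirst, PySem.List.enumerate, PySem.Dict.get?_empty] at h
  | append_singleton l e ih =>
    rw [pvFirst_append] at h
    by_cases hc : (pvFirst l).contains (pvKeyOf e) = true
    · rw [PySem.Dict.setdefault_of_contains _ _ hc] at h
      have := ih _ h
      simp only [List.length_append, List.length_cons, List.length_nil]
      push_cast
      omega
    · rw [PySem.Dict.setdefault_of_not_contains _ _ (by simpa using hc), PySem.Dict.get?_insert] at h
      simp only [List.length_append, List.length_cons, List.length_nil]
      by_cases hq : q = pvKeyOf e
      · rw [if_pos hq] at h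
        have : j = (l.length : Int) := by exact_mod_cast (Option.some.inj h).symm
        push_cast; omega
      · rw [if_neg hq] at h
        have := ih _ h
        push_cast; omega

-- A-side: the seen set after the fold is the set of keys of the prefix
theorem pvA_fst (l : List (List (String × String)))
    (s : PySem.Set (Option String × Option String × List (String × String))) (acc : List (List (String × String))) :
    (l.foldl
      (fun (st : PySem.Set (Option String × Option String × List (String × String)) × List (List (String × String))) event =>
        let key : Option String × Option String × List (String × String) :=
          ((PySem.Dict.mk event).get? "type", (PySem.Dict.mk event).get? "ts", ([] : List (String × String)))
        if PySem.Set.contains st.1 key then (st.1, st.2 ++ [event])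
        else (PySem.Set.add st.1 key, st.2))
      (s, acc)).1 = PySem.Set.update s (l.map pvKeyOf) := by
  induction l generalizing s acc with
  | nil => simp [PySem.Set.update]
  | cons e l ih =>
    simp only [List.foldl_cons, List.map_cons, PySem.Set.update_cons, pvKeyOf]
    by_cases hc : PySem.Set.contains s ((PySem.Dict.mk e).get? "type", (PySem.Dict.mk e).get? "ts", ([] : List (String × String))) = true
    · rw [if_pos hc, ih]
      rw [PySem.Set.add_of_mem (by rwa [← PySem.Set.contains_iff])]
    · rw [if_neg hc, ih]

theorem pvA_append (l : List (List (String × String))) (e : List (String × String)) :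
    detect_duplicate_events (l ++ [e]) =
      detect_duplicate_events l ++ (if pvKeyOf e ∈ l.map pvKeyOf then [e] else []) := by
  unfold detect_duplicate_events
  rw [List.foldl_append]
  simp only [List.foldl_cons, List.foldl_nil, pvA_fst, PySem.Set.update_empty,
    show ((PySem.Dict.mk e).get? "type", (PySem.Dict.mk e).get? "ts", ([] : List (String × String))) = pvKeyOf e from rfl]
  by_cases hm : pvKeyOf e ∈ l.map pvKeyOf
  · rw [if_pos hm, if_pos (by simp [PySem.Set.mem_ofList, hm])]
  · rw [if_neg hm, List.append_nil, if_neg (by simp [PySem.Set.mem_ofList, hm])]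

theorem pvB_append (l : List (List (String × String))) (e : List (String × String)) :
    detect_duplicate_events_alt (l ++ [e]) =
      detect_duplicate_events_alt l ++ (if pvKeyOf e ∈ l.map pvKeyOf then [e] else []) := by
  have halt : ∀ m : List (List (String × String)), detect_duplicate_events_alt m =
      ((PySem.List.enumerate m 0).filter (fun p => (pvFirst m).get? (pvKeyOf p.2) != some p.1)).map (fun p => p.2) :=
    fun m => rfl
  rw [halt, halt, pvFirst_append, PySem.List.enumerate_append]
  have hone : PySem.List.enumerate [e] ((0 : Int) + l.length) = [((l.length : Int), e)] := by
    simp [PySem.List.enumerate]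
  rw [hone, List.filter_append, List.map_append]
  congr 1
  · -- old entries: the setdefault does not change their lookups
    congr 1
    apply List.filter_congr
    intro p hp
    obtain ⟨k, hk, rfl⟩ := (PySem.List.mem_enumerate_iff _ _ _).1 hp
    have hmem : l[k] ∈ l := List.getElem_mem hk
    by_cases hc : (pvFirst l).contains (pvKeyOf e) = true
    · rw [PySem.Dict.setdefault_of_contains _ _ hc]
    · have hne : pvKeyOf (l[k]) ≠ pvKeyOf e := by
        intro heq
        exact hc ((pvFirst_contains l (pvKeyOf e)).2 (heq ▸ List.mem_map_of_mem hmem))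
      rw [PySem.Dict.setdefault_of_not_contains _ _ (by simpa using hc),
        PySem.Dict.get?_insert_of_ne _ _ hne]
  · -- the new entry: kept iff the key already occurred in l
    by_cases hm : pvKeyOf e ∈ l.map pvKeyOf
    · obtain ⟨j, hj⟩ : ∃ j, (pvFirst l).get? (pvKeyOf e) = some j := by
        have hc := (pvFirst_contains l (pvKeyOf e)).2 hm
        rw [PySem.Dict.contains_eq_isSome_get?] at hc
        exact Option.isSome_iff_exists.mp hc
      have hjn : j ≠ (l.length : Int) := by have := pvFirst_bound l _ _ hj; omega
      rw [if_pos hm]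
      simp [PySem.Dict.get?_setdefault_self, hj, hjn]
    · have hc : (pvFirst l).get? (pvKeyOf e) = none := by
        rw [PySem.Dict.get?_eq_none_iff_contains]
        simpa using fun h => hm ((pvFirst_contains l (pvKeyOf e)).1 h)
      rw [if_neg hm]
      simp [PySem.Dict.get?_setdefault_self, hc]

theorem pvAB (l : List (List (String × String))) :
    detect_duplicate_events l = detect_duplicate_events_alt l := by
  induction l using List.reverseRecOn with
  | nil => rfl
  | append_singleton l e ih => rw [pvA_append, pvB_append, ih]

-- ===== VERDICT (by name: the statement is the Claim_ definition above) =====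
theorem detect_duplicate_events_spec : Claim_equal_detect_duplicate_events := by
  intro events _
  unfold Spec_detect_duplicate_events
  exact pvAB events
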